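-- pv_equiv track=rewrite | github.com/dvzubarev/pylp | pylp/phrases/builder.py | _sorted_lists_intersect
-- ===== SOURCE A (Python) =====
-- def _sorted_lists_intersect(li1, li2):
--     i = j = 0
--     while i < len(li1) and j < len(li2):
--         if li1[i] < li2[j]:
--             i += 1
--         elif li2[j] < li1[i]:
--             j += 1
--         else:
--             return True
--
--     return False
-- ===== SOURCE B (Python) =====
-- def _sorted_lists_intersect(li1, li2):
--     # Consume reversed copies as stacks: normalise by swapping so that `lo`
--     # holds the smaller current element, then either report the tie or pop it.
--     lo = li1[::-1]
--     hi = li2[::-1]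
--     while lo and hi:
--         if hi[-1] < lo[-1]:
--             lo, hi = hi, lo
--         if not lo[-1] < hi[-1]:
--             return True
--         lo.pop()
--     return False
-- ===== Notes on version B (the rewrite author's own statement) =====
-- stated objective: alternative
-- what changed: Replaces the two-index merge walk over the lists in place by two reversed working copies consumed as stacks: each round swap-normalises so `lo` holds the smaller top, uses a single comparison direction, and pops the smaller top, instead of A's symmetric three-way branch advancing one of two indices.
import Mathlib
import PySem

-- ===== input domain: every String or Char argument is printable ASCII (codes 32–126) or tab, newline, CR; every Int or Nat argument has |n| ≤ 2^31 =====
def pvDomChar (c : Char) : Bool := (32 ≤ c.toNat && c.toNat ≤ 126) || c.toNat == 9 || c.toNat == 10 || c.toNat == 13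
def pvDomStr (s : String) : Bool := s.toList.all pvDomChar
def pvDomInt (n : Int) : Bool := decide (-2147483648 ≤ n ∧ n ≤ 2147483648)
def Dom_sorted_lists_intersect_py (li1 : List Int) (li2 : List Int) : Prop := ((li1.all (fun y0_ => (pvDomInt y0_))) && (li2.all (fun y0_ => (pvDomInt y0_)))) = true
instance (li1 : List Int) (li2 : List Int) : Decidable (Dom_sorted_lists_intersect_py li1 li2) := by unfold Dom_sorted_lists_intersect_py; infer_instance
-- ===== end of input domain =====

-- B consumes reversed working copies as stacks with a swap-normalisation and a
-- single comparison direction, instead of A's two-index three-way merge walk;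
-- same cost ('alternative'); proved equal on every input, sorted or not.

-- ===== PORT A =====
-- A's while loop over the two indices i, j; fuel = number of remaining loop steps
-- (each step increments i or j or returns, so li1.length + li2.length suffices);
-- li1[i] with i < len is exact as li1.getD i 0
def pvLoopA (li1 li2 : List Int) : Nat → Nat → Nat → Bool
  | 0, _, _ => false
  | fuel + 1, i, j =>
    if i < li1.length ∧ j < li2.length then
      if li1.getD i 0 < li2.getD j 0 then pvLoopA li1 li2 fuel (i + 1) j
      else if li2.getD j 0 < li1.getD i 0 then pvLoopA li1 li2 fuel i (j + 1)
      else true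
    else false

def sorted_lists_intersect_py (li1 : List Int) (li2 : List Int) : Bool :=
  pvLoopA li1 li2 (li1.length + li2.length) 0 0

-- ===== PORT B =====
-- Source B's while loop over the two stacks lo, hi; lo[-1] with lo nonempty is
-- exact as PySem.List.pyGetD lo (-1) 0, lo.pop() shrinks lo to lo.dropLast;
-- fuel = number of remaining loop steps (each step pops one element or
-- returns, so the total number of elements suffices)
-- Source B's while loop; the swap `lo, hi = hi, lo` is the match on the pair
def pvLoopB : Nat → List Int → List Int → Bool
  | 0, _, _ => false
  | fuel + 1, lo, hi =>
    if lo ≠ [] ∧ hi ≠ [] then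
      match (if PySem.List.pyGetD hi (-1) 0 < PySem.List.pyGetD lo (-1) 0
             then (hi, lo) else (lo, hi)) with
      | (lo, hi) =>
        if ¬ PySem.List.pyGetD lo (-1) 0 < PySem.List.pyGetD hi (-1) 0 then true
        else pvLoopB fuel lo.dropLast hi
    else false

-- li1[::-1] is exact as List.reverse (PySem.List.slice? none none (-1))
def sorted_lists_intersect_py_alt (li1 : List Int) (li2 : List Int) : Bool :=
  pvLoopB (li1.length + li2.length) li1.reverse li2.reverse

-- ===== PRECONDITION & SPEC =====
def Spec_sorted_lists_intersect_py (li1 : List Int) (li2 : List Int) (out : Bool) : Prop := out = sorted_lists_intersect_py_alt li1 li2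
instance (li1 : List Int) (li2 : List Int) (out : Bool) : Decidable (Spec_sorted_lists_intersect_py li1 li2 out) := by unfold Spec_sorted_lists_intersect_py; infer_instance

-- ===== CLAIM (what is proved, stated in full; the proofs are below) =====
def Claim_equal_sorted_lists_intersect_py : Prop := ∀ (li1 : List Int) (li2 : List Int), Dom_sorted_lists_intersect_py li1 li2 → Spec_sorted_lists_intersect_py li1 li2 (sorted_lists_intersect_py li1 li2)

-- ===== LEMMAS AND PROOFS =====

-- the top of the reversed suffix stack is the current element of the walk
lemma pv_top_rev {l : List Int} {i : Nat} (h : i < l.length) :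
    PySem.List.pyGetD ((l.drop i).reverse) (-1) 0 = l[i] := by
  rw [List.drop_eq_getElem_cons h]
  simp [PySem.List.pyGetD, PySem.List.pyGet?_neg_one, List.getElem?_eq_getElem h]

-- popping the reversed suffix stack advances the walk's index
lemma pv_pop_rev {l : List Int} {i : Nat} (h : i < l.length) :
    ((l.drop i).reverse).dropLast = (l.drop (i + 1)).reverse := by
  rw [List.drop_eq_getElem_cons h]
  simp

-- B's stack loop, started on the reversed suffixes in either order, runs in
-- lock-step with A's index walk (same fuel: both spend one unit per iteration)
lemma pvLoopB_eq_pvLoopA (li1 li2 : List Int) (fuel i j : Nat) :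
    pvLoopB fuel ((li1.drop i).reverse) ((li2.drop j).reverse) = pvLoopA li1 li2 fuel i j ∧
    pvLoopB fuel ((li2.drop j).reverse) ((li1.drop i).reverse) = pvLoopA li1 li2 fuel i j := by
  induction fuel generalizing i j with
  | zero => exact ⟨rfl, rfl⟩
  | succ fuel ih =>
    simp only [pvLoopB, pvLoopA]
    have hne : ((li1.drop i).reverse ≠ [] ∧ (li2.drop j).reverse ≠ []) ↔
        (i < li1.length ∧ j < li2.length) := by
      simp [List.drop_eq_nil_iff]
    by_cases hb : i < li1.length ∧ j < li2.length
    · have hg1 : li1.getD i 0 = li1[i] := List.getD_eq_getElem li1 0 hb.1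
      have hg2 : li2.getD j 0 = li2[j] := List.getD_eq_getElem li2 0 hb.2
      rw [if_pos (hne.mpr hb), if_pos ((and_comm.mp <| hne.mpr hb)), if_pos hb,
        pv_top_rev hb.1, pv_top_rev hb.2, hg1, hg2]
      refine ⟨?_, ?_⟩
      all_goals by_cases hlt1 : li1[i] < li2[j]
      -- conjunct 1 (lo = li1-suffix, hi = li2-suffix), case li1[i] < li2[j]
      · rw [if_neg (by omega : ¬ li2[j] < li1[i]), if_pos hlt1]
        dsimp only
        rw [pv_top_rev hb.1, pv_top_rev hb.2,
          if_neg (by simpa using hlt1), pv_pop_rev hb.1]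
        exact (ih (i + 1) j).1
      · by_cases hlt2 : li2[j] < li1[i]
        · rw [if_pos hlt2, if_neg hlt1, if_pos hlt2]
          dsimp only
          rw [pv_top_rev hb.1, pv_top_rev hb.2,
            if_neg (by simpa using hlt2), pv_pop_rev hb.2]
          exact (ih i (j + 1)).2
        · rw [if_neg hlt2, if_neg hlt1, if_neg hlt2]
          dsimp only
          rw [pv_top_rev hb.1, pv_top_rev hb.2, if_pos (by simpa using hlt1)]
      -- conjunct 2 (lo = li2-suffix, hi = li1-suffix), case li1[i] < li2[j]
      · rw [if_pos hlt1, if_pos hlt1]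
        dsimp only
        rw [pv_top_rev hb.1, pv_top_rev hb.2,
          if_neg (by simpa using hlt1), pv_pop_rev hb.1]
        exact (ih (i + 1) j).1
      · by_cases hlt2 : li2[j] < li1[i]
        · rw [if_neg hlt1, if_neg hlt1, if_pos hlt2]
          dsimp only
          rw [pv_top_rev hb.1, pv_top_rev hb.2,
            if_neg (by simpa using hlt2), pv_pop_rev hb.2]
          exact (ih i (j + 1)).2
        · rw [if_neg hlt1, if_neg hlt1, if_neg hlt2]
          dsimp only
          rw [pv_top_rev hb.1, pv_top_rev hb.2, if_pos (by simpa using hlt2)]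
    · rw [if_neg hb, if_neg (fun h => hb (hne.mp h)),
        if_neg (fun h => hb (hne.mp (and_comm.mp h)))]
      exact ⟨rfl, rfl⟩

-- ===== VERDICT (by name: the statement is the Claim_ definition above) =====
theorem sorted_lists_intersect_py_spec : Claim_equal_sorted_lists_intersect_py := by
  intro li1 li2 _
  unfold Spec_sorted_lists_intersect_py sorted_lists_intersect_py sorted_lists_intersect_py_alt
  have h := (pvLoopB_eq_pvLoopA li1 li2 (li1.length + li2.length) 0 0).1
  simpa using h.symm
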